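-- pv_equiv track=rewrite | github.com/ZelinW/COM6509 | Text/Assessment2/Document_Retrieval_Assignment_Files/my_retriever.py | compute_binary
-- ===== SOURCE A (Python) =====
-- def compute_binary(query, document):
--     total_words = set(query).union(set(document))
--     same_words = set(query).intersection(set(document))
--     same_count = len(same_words)
--     binary_query = dict.fromkeys(total_words, 0)
--     for word in query:
--         binary_query[word] = 1
--     binary_document = dict.fromkeys(total_words, 0)
--     for word in document:
--         binary_document[word] = 1
--     return binary_query, binary_document, same_count
-- ===== SOURCE B (Python) =====
-- def compute_binary(query, document):
--     # One combined mask dict: value 1 = query-only, 2 = document-only, 3 = both.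
--     # Both binary vectors and the shared count are projections of this single structure.
--     mask = {}
--     for w in query:
--         mask[w] = 1
--     for w in document:
--         mask[w] = mask.get(w, 0) % 2 + 2
--     binary_query = {w: m % 2 for w, m in mask.items()}
--     binary_document = {w: m // 2 for w, m in mask.items()}
--     same_count = sum(1 for m in mask.values() if m == 3)
--     return binary_query, binary_document, same_count
-- ===== Notes on version B (the rewrite author's own statement) =====
-- stated objective: alternative
-- what changed: A builds two sets, their union and intersection and two fromkeys-then-mark dicts; B builds no sets at all: it folds both word lists into ONE bitmask dict (1=query-only, 2=document-only, 3=both) and derives both binary vectors (m%2, m//2) and the shared count (values equal to 3) as projections of that single structure.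
import Mathlib
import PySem

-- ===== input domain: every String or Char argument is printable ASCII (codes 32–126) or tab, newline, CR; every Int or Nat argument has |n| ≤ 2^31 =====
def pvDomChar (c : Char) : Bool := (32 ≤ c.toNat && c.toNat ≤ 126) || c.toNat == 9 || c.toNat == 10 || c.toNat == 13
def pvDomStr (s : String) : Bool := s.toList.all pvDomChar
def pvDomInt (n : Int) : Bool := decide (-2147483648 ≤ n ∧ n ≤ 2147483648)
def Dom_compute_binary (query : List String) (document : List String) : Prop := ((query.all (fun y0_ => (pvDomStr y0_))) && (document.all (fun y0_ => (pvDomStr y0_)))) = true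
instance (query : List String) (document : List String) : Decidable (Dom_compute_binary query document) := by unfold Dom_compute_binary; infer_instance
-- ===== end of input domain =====

-- B replaces A's sets/union/intersection and two fromkeys-then-mark dicts by ONE bitmask
-- dict (1 = query-only, 2 = document-only, 3 = both) from which both binary vectors and
-- the shared count are derived as projections (alternative algorithm, same asymptotic cost).

-- ===== PORT A =====
def compute_binary (query : List String) (document : List String) : (List (String × Int)) × (List (String × Int)) × Int :=
  let total_words : PySem.Set String := PySem.Set.union (PySem.Set.ofList query) (PySem.Set.ofList document)
  let same_words : PySem.Set String := PySem.Set.inter (PySem.Set.ofList query) (PySem.Set.ofList document)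
  let same_count : Int := (same_words.length : Int)
  let binary_query0 : PySem.Dict String Int :=
    total_words.foldl (fun d w => d.insert w 0) PySem.Dict.empty          -- dict.fromkeys(total_words, 0)
  let binary_query : PySem.Dict String Int :=
    query.foldl (fun d w => d.insert w 1) binary_query0                   -- for word in query: [word] = 1
  let binary_document0 : PySem.Dict String Int :=
    total_words.foldl (fun d w => d.insert w 0) PySem.Dict.empty
  let binary_document : PySem.Dict String Int :=
    document.foldl (fun d w => d.insert w 1) binary_document0
  (binary_query.items, binary_document.items, same_count)

-- ===== PORT B =====
def compute_binary_alt (query : List String) (document : List String) : (List (String × Int)) × (List (String × Int)) × Int :=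
  let mask1 : PySem.Dict String Int :=
    query.foldl (fun d w => d.insert w 1) PySem.Dict.empty                -- for w in query: mask[w] = 1
  let mask : PySem.Dict String Int :=
    document.foldl (fun d w => d.insert w (PySem.Int.mod (d.getD w 0) 2 + 2)) mask1
                                                                          -- for w in document: mask[w] = mask.get(w,0) % 2 + 2
  let binary_query : List (String × Int) := mask.items.map (fun p => (p.1, PySem.Int.mod p.2 2))
  let binary_document : List (String × Int) := mask.items.map (fun p => (p.1, PySem.Int.floordiv p.2 2))
  let same_count : Int := mask.values.foldl (fun acc m => if m == 3 then acc + 1 else acc) 0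
  (binary_query, binary_document, same_count)

-- ===== PRECONDITION & SPEC =====
def Spec_compute_binary (query : List String) (document : List String) (out : (List (String × Int)) × (List (String × Int)) × Int) : Prop := out = compute_binary_alt query document
instance (query : List String) (document : List String) (out : (List (String × Int)) × (List (String × Int)) × Int) : Decidable (Spec_compute_binary query document out) := by unfold Spec_compute_binary; infer_instance

-- ===== CLAIM (what is proved, stated in full; the proofs are below) =====
def Claim_equal_compute_binary : Prop := ∀ (query : List String) (document : List String), Dom_compute_binary query document → Spec_compute_binary query document (compute_binary query document)

-- ===== LEMMAS AND PROOFS =====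

lemma pv_update_of_subset (xs : List String) : ∀ (s : PySem.Set String), (∀ x ∈ xs, x ∈ s) → PySem.Set.update s xs = s := by
  induction xs with
  | nil => intro s _; rfl
  | cons x t ih =>
    intro s h
    have hx : PySem.Set.add s x = s := by
      simp [PySem.Set.add, PySem.Set.contains, h x (by simp)]
    show PySem.Set.update (PySem.Set.add s x) t = s
    rw [hx]; exact ih s (fun y hy => h y (by simp [hy]))

lemma pv_update_fresh (xs : List String) : ∀ (s : PySem.Set String), xs.Nodup → (∀ x ∈ xs, x ∉ s) → PySem.Set.update s xs = s ++ xs := by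
  induction xs with
  | nil => intro s _ _; simp [PySem.Set.update]
  | cons x t ih =>
    intro s hnd h
    have hx : PySem.Set.add s x = s ++ [x] := by
      simp [PySem.Set.add, PySem.Set.contains, h x (by simp)]
    show PySem.Set.update (PySem.Set.add s x) t = s ++ x :: t
    rw [hx, ih (s ++ [x]) hnd.of_cons]
    · simp
    · intro y hy
      simp only [List.mem_append, List.mem_singleton]
      rintro (hys | rfl)
      · exact h y (by simp [hy]) hys
      · exact (List.nodup_cons.mp hnd).1 hy

lemma pv_mark_getD (xs : List String) : ∀ (d : PySem.Dict String Int) (w : String),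
    (xs.foldl (fun d x => d.insert x 1) d).getD w 0 = if w ∈ xs then 1 else d.getD w 0 := by
  induction xs with
  | nil => intro d w; simp
  | cons x t ih =>
    intro d w
    show (t.foldl (fun d x => d.insert x 1) (d.insert x 1)).getD w 0 = _
    rw [ih]
    rw [PySem.Dict.getD_insert]
    by_cases hw : w = x <;> by_cases ht : w ∈ t <;> simp [hw, ht]

lemma pv_fromkeys_getD (total : List String) (ht : total.Nodup) (w : String) (hw : w ∈ total) :
    (total.foldl (fun d w => d.insert w (0:Int)) PySem.Dict.empty).getD w 0 = 0 := by
  have hitems := PySem.Dict.items_foldl_insert_fresh total (fun a => a) (fun _ => (0:Int)) PySem.Dict.empty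
    (fun a _ => PySem.Dict.contains_empty a) (by simpa using ht)
  have hkeys : (total.foldl (fun d w => d.insert w (0:Int)) PySem.Dict.empty).keys.Nodup := by
    refine PySem.Dict.nodup_keys_foldl_insert total (fun _ _ => 0) PySem.Dict.empty ?_
    simp [PySem.Dict.keys_empty]
  refine PySem.Dict.getD_of_mem_items _ ?_ hkeys 0
  rw [hitems]; simp [hw]

lemma pv_mark_items (total xs : List String) (ht : total.Nodup) (hsub : ∀ x ∈ xs, x ∈ total) :
    (xs.foldl (fun d w => d.insert w (1:Int)) (total.foldl (fun d w => d.insert w (0:Int)) PySem.Dict.empty)).items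
      = total.map (fun w => (w, if w ∈ xs then (1:Int) else 0)) := by
  have hk0 : (total.foldl (fun d w => d.insert w (0:Int)) PySem.Dict.empty).keys = total := by
    rw [PySem.Dict.keys_foldl_insert total (fun _ _ => 0) PySem.Dict.empty]
    rw [PySem.Dict.keys_empty]
    have := pv_update_fresh total ([] : PySem.Set String) ht (by simp)
    simpa using this
  have hkeys : (xs.foldl (fun d w => d.insert w (1:Int)) (total.foldl (fun d w => d.insert w (0:Int)) PySem.Dict.empty)).keys = total := by
    rw [PySem.Dict.keys_foldl_insert xs (fun _ _ => 1), hk0]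
    exact pv_update_of_subset xs total hsub
  have hnd : (xs.foldl (fun d w => d.insert w (1:Int)) (total.foldl (fun d w => d.insert w (0:Int)) PySem.Dict.empty)).keys.Nodup := by
    rw [hkeys]; exact ht
  rw [PySem.Dict.items_eq_map_keys _ hnd 0, hkeys]
  refine List.map_congr_left ?_
  intro w hw
  rw [pv_mark_getD]
  by_cases hx : w ∈ xs
  · simp [hx]
  · simp [hx, pv_fromkeys_getD total ht w hw]

lemma pv_update_split (doc : List String) : ∀ (q : PySem.Set String),
    ∃ t, PySem.Set.update q doc = q ++ t ∧ ∀ y ∈ t, y ∉ q := by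
  induction doc with
  | nil => intro q; exact ⟨[], by simp [PySem.Set.update], by simp⟩
  | cons x d ih =>
    intro q
    by_cases hx : x ∈ q
    · have : PySem.Set.add q x = q := by simp [PySem.Set.add, PySem.Set.contains, hx]
      obtain ⟨t, h1, h2⟩ := ih q
      exact ⟨t, by rw [show PySem.Set.update q (x :: d) = PySem.Set.update (PySem.Set.add q x) d from rfl, this, h1], h2⟩
    · have : PySem.Set.add q x = q ++ [x] := by simp [PySem.Set.add, PySem.Set.contains, hx]
      obtain ⟨t, h1, h2⟩ := ih (q ++ [x])
      refine ⟨x :: t, ?_, ?_⟩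
      · rw [show PySem.Set.update q (x :: d) = PySem.Set.update (PySem.Set.add q x) d from rfl, this, h1]
        simp
      · intro y hy
        rcases List.mem_cons.mp hy with rfl | hyt
        · exact hx
        · intro hyq; exact h2 y hyt (by simp [hyq])

lemma pv_count_eq (q dd : PySem.Set String) (doc : List String) :
    (List.countP (fun w => q.contains w && dd.contains w) (PySem.Set.update q doc) : Int)
      = ((q.filter (fun x => PySem.Set.contains dd x)).length : Int) := by
  obtain ⟨t, h1, h2⟩ := pv_update_split doc q
  rw [h1, List.countP_append]
  have ht0 : List.countP (fun w => q.contains w && dd.contains w) t = 0 := by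
    rw [List.countP_eq_zero]
    intro y hy
    simp only [Bool.and_eq_true, not_and]
    intro hyq
    exact absurd (by simpa using hyq) (h2 y hy)
  have hq : List.countP (fun w => q.contains w && dd.contains w) q
      = List.countP (fun w => dd.contains w) q := by
    apply List.countP_congr
    intro y hy
    simp [hy]
  rw [ht0, hq, ← List.countP_eq_length_filter]
  rfl

-- the union list A iterates equals the key list B's mask dict accumulates
lemma pv_total_eq (q : List String) (d : List String) :
    PySem.Set.union (PySem.Set.ofList q) (PySem.Set.ofList d)
      = PySem.Set.update (PySem.Set.ofList q) d := by
  show PySem.Set.update (PySem.Set.ofList q) (PySem.Set.ofList d) = _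
  rw [PySem.Set.update_eq_append_filter, PySem.Set.update_eq_append_filter, PySem.Set.ofList_ofList]

lemma pv_doc_getD (doc : List String) : ∀ (d : PySem.Dict String Int) (w : String),
    (doc.foldl (fun d x => d.insert x (PySem.Int.mod (d.getD x 0) 2 + 2)) d).getD w 0
      = if w ∈ doc then PySem.Int.mod (d.getD w 0) 2 + 2 else d.getD w 0 := by
  induction doc with
  | nil => intro d w; simp
  | cons x t ih =>
    intro d w
    show (t.foldl _ (d.insert x (PySem.Int.mod (d.getD x 0) 2 + 2))).getD w 0 = _
    rw [ih, PySem.Dict.getD_insert]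
    by_cases hw : w = x <;> by_cases ht : w ∈ t <;>
      simp [hw, ht]

-- the mask dict's items: each union word paired with its 0/1/2/3 bitmask value
lemma pv_mask_items (query document : List String) :
    (document.foldl (fun d w => d.insert w (PySem.Int.mod (d.getD w 0) 2 + 2))
        (query.foldl (fun d w => d.insert w (1:Int)) PySem.Dict.empty)).items
      = (PySem.Set.update (PySem.Set.ofList query) document).map
          (fun w => (w, if w ∈ document then PySem.Int.mod (if w ∈ query then (1:Int) else 0) 2 + 2
                        else if w ∈ query then (1:Int) else 0)) := by
  have hk1 : (query.foldl (fun d w => d.insert w (1:Int)) PySem.Dict.empty).keys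
      = PySem.Set.ofList query := by
    rw [PySem.Dict.keys_foldl_insert query (fun _ _ => 1) PySem.Dict.empty, PySem.Dict.keys_empty]
    rfl
  have hkeys : (document.foldl (fun d w => d.insert w (PySem.Int.mod (d.getD w 0) 2 + 2))
        (query.foldl (fun d w => d.insert w (1:Int)) PySem.Dict.empty)).keys
      = PySem.Set.update (PySem.Set.ofList query) document := by
    rw [PySem.Dict.keys_foldl_insert document (fun d x => PySem.Int.mod (d.getD x 0) 2 + 2), hk1]
  have hnd : (document.foldl (fun d w => d.insert w (PySem.Int.mod (d.getD w 0) 2 + 2))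
        (query.foldl (fun d w => d.insert w (1:Int)) PySem.Dict.empty)).keys.Nodup := by
    rw [hkeys]
    exact PySem.Set.nodup_update _ _ (PySem.Set.nodup_ofList query)
  rw [PySem.Dict.items_eq_map_keys _ hnd 0, hkeys]
  refine List.map_congr_left ?_
  intro w _
  rw [pv_doc_getD, pv_mark_getD, PySem.Dict.getD_empty]

theorem pv_ab_eq (query document : List String) : compute_binary query document = compute_binary_alt query document := by
  have htnd : (PySem.Set.union (PySem.Set.ofList query) (PySem.Set.ofList document)).Nodup :=
    PySem.Set.nodup_update _ _ (PySem.Set.nodup_ofList query)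
  have hsubq : ∀ x ∈ query, x ∈ PySem.Set.union (PySem.Set.ofList query) (PySem.Set.ofList document) := by
    intro x hx
    exact (PySem.Set.mem_update _ _ x).mpr (Or.inl ((PySem.Set.mem_ofList query x).mpr hx))
  have hsubd : ∀ x ∈ document, x ∈ PySem.Set.union (PySem.Set.ofList query) (PySem.Set.ofList document) := by
    intro x hx
    exact (PySem.Set.mem_update _ _ x).mpr (Or.inr ((PySem.Set.mem_ofList document x).mpr hx))
  simp only [compute_binary, compute_binary_alt]
  rw [pv_mask_items, ← pv_total_eq]
  simp only [Prod.mk.injEq]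
  refine ⟨?_, ?_, ?_⟩
  · rw [pv_mark_items _ query htnd hsubq, List.map_map]
    refine List.map_congr_left ?_
    intro w _
    by_cases hq : w ∈ query <;> by_cases hd : w ∈ document <;>
      simp [hq, hd, PySem.Int.mod]
  · rw [pv_mark_items _ document htnd hsubd, List.map_map]
    refine List.map_congr_left ?_
    intro w _
    by_cases hq : w ∈ query <;> by_cases hd : w ∈ document <;>
      simp [hq, hd, PySem.Int.mod, PySem.Int.floordiv]
  · rw [show ∀ (d : PySem.Dict String Int), d.values = d.items.map Prod.snd from fun _ => rfl]
    rw [pv_mask_items, ← pv_total_eq, List.map_map, PySem.List.foldl_if_add_one, zero_add, List.countP_map]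
    have hcong : List.countP
        ((fun m => m == (3:Int)) ∘ Prod.snd ∘ (fun w => (w, if w ∈ document then PySem.Int.mod (if w ∈ query then (1:Int) else 0) 2 + 2
                        else if w ∈ query then (1:Int) else 0)))
        (PySem.Set.union (PySem.Set.ofList query) (PySem.Set.ofList document))
        = List.countP (fun w => (PySem.Set.ofList query).contains w && (PySem.Set.ofList document).contains w)
        (PySem.Set.union (PySem.Set.ofList query) (PySem.Set.ofList document)) := by
      apply List.countP_congr
      intro w _
      by_cases hq : w ∈ query <;> by_cases hd : w ∈ document <;>
        simp [hq, hd, PySem.Int.mod, PySem.Set.contains, PySem.Set.mem_ofList]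
    rw [hcong]
    rw [show PySem.Set.union (PySem.Set.ofList query) (PySem.Set.ofList document)
          = PySem.Set.update (PySem.Set.ofList query) (PySem.Set.ofList document) from rfl]
    rw [pv_count_eq (PySem.Set.ofList query) (PySem.Set.ofList document) (PySem.Set.ofList document)]
    rfl

-- ===== VERDICT (by name: the statement is the Claim_ definition above) =====
theorem compute_binary_spec : Claim_equal_compute_binary := by
  intro query document _
  show compute_binary query document = compute_binary_alt query document
  exact pv_ab_eq query document
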